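-- pv_equiv track=rewrite | github.com/aisaev-68/Python-Basic | Module19/09_pedigree/main.py | f_check_sym
-- ===== SOURCE A (Python) =====
-- def f_check_sym(txt_str):
--     count_sym = 0
--     for i_sym in txt_str:
--         if ' ' in i_sym:
--             count_sym += 1
--     if count_sym == 1:
--         return True
--     else:
--         return False
-- ===== SOURCE B (Python) =====
-- def f_check_sym(txt_str):
--     first = txt_str.find(' ')
--     if first == -1:
--         return False
--     return txt_str.find(' ', first + 1) == -1
-- ===== Notes on version B (the rewrite author's own statement) =====
-- stated objective: idiomatic
-- what changed: B replaces A's full-scan per-character space counting with positional search: find the first space and check that no second space follows, short-circuiting; the scan runs in C-level str.find instead of a Python loop.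
import Mathlib
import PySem

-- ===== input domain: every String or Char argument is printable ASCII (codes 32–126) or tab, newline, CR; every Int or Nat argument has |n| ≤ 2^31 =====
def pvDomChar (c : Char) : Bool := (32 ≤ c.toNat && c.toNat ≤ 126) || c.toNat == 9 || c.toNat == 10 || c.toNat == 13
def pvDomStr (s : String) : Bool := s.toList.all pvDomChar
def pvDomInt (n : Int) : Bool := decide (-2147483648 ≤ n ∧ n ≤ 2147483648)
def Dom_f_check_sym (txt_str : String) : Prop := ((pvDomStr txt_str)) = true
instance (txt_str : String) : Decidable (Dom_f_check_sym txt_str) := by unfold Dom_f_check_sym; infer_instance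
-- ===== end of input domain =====

-- ===== PORT A =====
-- A counts characters equal to ' ' and returns count == 1.
def f_check_sym (txt_str : String) : Bool :=
  let count_sym := txt_str.toList.foldl
    (fun c i_sym => if PySem.Chars.isIn [' '] [i_sym] then c + 1 else c) (0 : Int)
  if count_sym = 1 then true else false

-- ===== PORT B =====
-- B finds the first space and checks no second space follows (return value only).
def f_check_sym_alt (txt_str : String) : Bool :=
  let first := PySem.Str.find txt_str " "
  if first = -1 then false
  else decide (PySem.Str.findFrom txt_str " " (first + 1) none = -1)

-- ===== PRECONDITION & SPEC =====
def Spec_f_check_sym (txt_str : String) (out : Bool) : Prop := out = f_check_sym_alt txt_str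
instance (txt_str : String) (out : Bool) : Decidable (Spec_f_check_sym txt_str out) := by unfold Spec_f_check_sym; infer_instance

-- ===== CLAIM (what is proved, stated in full; the proofs are below) =====
def Claim_equal_f_check_sym : Prop := ∀ (txt_str : String), Dom_f_check_sym txt_str → Spec_f_check_sym txt_str (f_check_sym txt_str)

-- ===== LEMMAS AND PROOFS =====

-- [' '] is a prefix of xs iff xs starts with ' '
theorem space_prefix_iff (xs : List Char) : [' '] <+: xs ↔ xs.head? = some ' ' := by
  cases xs with
  | nil => simp
  | cons a t =>
    constructor
    · rintro ⟨s, hs⟩; simp at hs; simp [← hs.1]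
    · intro h; simp at h; exact ⟨t, by simp [h]⟩

theorem isIn_space_singleton (c : Char) :
    PySem.Chars.isIn [' '] [c] = (c == ' ') := by
  by_cases h : c = ' '
  · subst h; decide
  · have : ¬ ([' '] <:+: [c]) := by
      rw [List.singleton_infix_iff]; simp [Ne.symm h]
    simp [(PySem.Chars.isIn_eq_false_iff [' '] [c]).mpr this, h]

theorem foldl_count_space (l : List Char) (n : Int) :
    l.foldl (fun c i_sym => if PySem.Chars.isIn [' '] [i_sym] then c + 1 else c) n
      = n + (l.count ' ' : Int) := by
  induction l generalizing n with
  | nil => simp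
  | cons a t ih =>
    rw [List.foldl_cons, ih]
    by_cases h : a = ' ' <;> simp [isIn_space_singleton, h] <;> push_cast <;> ring

-- the heart: counting spaces to exactly one = first find succeeds and second find fails
theorem count_find (l : List Char) :
    (if (l.count ' ' : Int) = 1 then true else false) =
      (if PySem.Chars.find l [' '] = -1 then false
       else decide (PySem.Chars.findFrom l [' '] ((PySem.Chars.find l [' ']) + 1) none = -1)) := by
  by_cases hF : PySem.Chars.find l [' '] = -1
  · have hmem : ' ' ∉ l := by
      have h := (PySem.Chars.find_eq_neg_one_iff l [' ']).mp hF
      rw [List.singleton_infix_iff] at h; exact h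
    have hc : l.count ' ' = 0 := List.count_eq_zero.mpr hmem
    simp [hF, hc]
  · have h0 : 0 ≤ PySem.Chars.find l [' '] := by
      have := PySem.Chars.neg_one_le_find l [' ']; omega
    obtain ⟨hpre, hmin⟩ := PySem.Chars.find_spec h0
    set p := (PySem.Chars.find l [' ']).toNat with hp
    have hdp : (l.drop p).head? = some ' ' := (space_prefix_iff _).mp hpre
    have hplen : p < l.length := by
      by_contra h
      rw [List.drop_eq_nil_of_le (by omega)] at hdp; simp at hdp
    have htake : (l.take p).count ' ' = 0 := by
      rw [List.count_eq_zero]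
      intro hmem
      obtain ⟨i, hi, hgi⟩ := List.getElem_of_mem hmem
      have hi' : i < p := by simpa using hi.trans_le (List.length_take_le p l)
      refine hmin i hi' ?_
      rw [space_prefix_iff, List.head?_drop]
      rw [List.getElem_take] at hgi
      simp [List.getElem?_eq_getElem (by omega : i < l.length), hgi]
    have hdrop : l.drop p = ' ' :: l.drop (p+1) := by
      cases hdl : l.drop p with
      | nil => rw [hdl] at hdp; simp at hdp
      | cons a t =>
        rw [hdl] at hdp; simp at hdp
        have ht : t = l.drop (p+1) := by
          rw [← List.tail_drop, hdl]; rfl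
        rw [hdp, ht]
    have hdropcount : l.count ' ' = 1 + (l.drop (p+1)).count ' ' := by
      calc l.count ' ' = (l.take p ++ l.drop p).count ' ' := by
            rw [List.take_append_drop]
        _ = (l.take p).count ' ' + (l.drop p).count ' ' := List.count_append ..
        _ = 1 + (l.drop (p+1)).count ' ' := by
            rw [htake, hdrop]; simp; omega
    have hcast : PySem.Chars.find l [' '] + 1 = ((p + 1 : Nat) : Int) := by
      push_cast; omega
    rw [if_neg hF, hcast]
    have hiff : PySem.Chars.findFrom l [' '] ((p+1 : Nat) : Int) none = -1 ↔
        ' ' ∉ l.drop (p+1) := by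
      rw [PySem.Chars.findFrom_natCast_eq_neg_one_iff l [' '] (p+1) (by omega),
        List.singleton_infix_iff]
    by_cases hmem2 : ' ' ∈ l.drop (p+1)
    · have hge : 0 < (l.drop (p+1)).count ' ' := List.count_pos_iff.mpr hmem2
      have hne : ¬ ((l.count ' ' : Int) = 1) := by
        intro h
        have : l.count ' ' = 1 := by exact_mod_cast h
        omega
      rw [if_neg hne, decide_eq_false (fun hh => (hiff.mp hh) hmem2)]
    · have hz : (l.drop (p+1)).count ' ' = 0 := List.count_eq_zero.mpr hmem2
      have h1 : (l.count ' ' : Int) = 1 := by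
        have : l.count ' ' = 1 := by omega
        exact_mod_cast this
      rw [if_pos h1, decide_eq_true (hiff.mpr hmem2)]

-- ===== VERDICT (by name: the statement is the Claim_ definition above) =====
theorem f_check_sym_spec : Claim_equal_f_check_sym := by
  intro txt_str _
  unfold Spec_f_check_sym f_check_sym f_check_sym_alt
  simp only [foldl_count_space, PySem.Str.find_eq, PySem.Str.findFrom_eq, Int.zero_add,
    show (" " : String).toList = [' '] from rfl]
  exact count_find txt_str.toList
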